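-- pv_equiv track=rewrite | github.com/kiharalab/NuFold | nufold/data/parsers.py | db2cmap
-- ===== SOURCE A (Python) =====
-- def db2cmap(ss_string: str):
--     res = []
--     brackets = [("(", ")"), ("[", "]"), ("{", "}")]
--     for ob, cb in brackets:
--         tmp = []
--         for i, s in enumerate(ss_string):
--             if s == ob:
--                 tmp.append(i)
--             elif s == cb:
--                 res.append((tmp.pop(), i))
--     mat = [[[0] for j in range(len(ss_string))] for i in range(len(ss_string))]
--     for i, j in res:
--         mat[i][j] = [1]
--         mat[j][i] = [1]
--     return mat
-- ===== SOURCE B (Python) =====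
-- def db2cmap(ss_string: str):
--     # One fused pass: three stacks plus a symmetric partner map, then the
--     # matrix is built directly by comprehension (no zero-matrix mutation).
--     partner = {}
--     stk_paren, stk_square, stk_curly = [], [], []
--     for i, s in enumerate(ss_string):
--         if s == "(":
--             stk_paren.append(i)
--         elif s == "[":
--             stk_square.append(i)
--         elif s == "{":
--             stk_curly.append(i)
--         elif s == ")":
--             j = stk_paren.pop()
--             partner[i] = j
--             partner[j] = i
--         elif s == "]":
--             j = stk_square.pop()
--             partner[i] = j
--             partner[j] = i
--         elif s == "}":
--             j = stk_curly.pop()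
--             partner[i] = j
--             partner[j] = i
--     n = len(ss_string)
--     return [[[1] if partner.get(i) == j else [0] for j in range(n)] for i in range(n)]
-- ===== Notes on version B (the rewrite author's own statement) =====
-- stated objective: idiomatic
-- what changed: A scans the string three times (once per bracket type) collecting (open,close) pairs and then mutates a preallocated zero matrix; B makes one fused pass over the string maintaining three stacks and a symmetric partner dictionary and builds the matrix directly by comprehension from partner lookups, never mutating a matrix.
import Mathlib
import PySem

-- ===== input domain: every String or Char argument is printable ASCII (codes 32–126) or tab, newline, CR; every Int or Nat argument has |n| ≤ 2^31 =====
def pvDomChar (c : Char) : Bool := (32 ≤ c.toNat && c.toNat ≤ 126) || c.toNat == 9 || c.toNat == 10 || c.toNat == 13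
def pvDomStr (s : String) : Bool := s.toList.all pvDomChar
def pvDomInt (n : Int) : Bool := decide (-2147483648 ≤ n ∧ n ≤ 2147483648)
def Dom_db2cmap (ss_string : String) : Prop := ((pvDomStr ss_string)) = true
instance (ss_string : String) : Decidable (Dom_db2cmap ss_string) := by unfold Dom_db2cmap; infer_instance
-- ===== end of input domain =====

-- B fuses A's three per-bracket scans into one pass filling a symmetric partner map and
-- builds the matrix directly by comprehension instead of mutating a zero matrix (objective: idiomatic).

-- ===== PORT A =====
-- per-bracket-type scan: 'for i, s in enumerate(ss_string): if s == ob: tmp.append(i) elif s == cb: res.append((tmp.pop(), i))'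
def pvScanA (ob cb : Char) : List (Int × Char) → List Int → List (Int × Int) →
    Option (List Int × List (Int × Int))
  | [], tmp, res => some (tmp, res)
  | (i, s) :: rest, tmp, res =>
    if s = ob then pvScanA ob cb rest (tmp ++ [i]) res
    else if s = cb then
      match PySem.List.pop? tmp with          -- tmp.pop(): none = IndexError on empty stack
      | none => none
      | some (j, tmp') => pvScanA ob cb rest tmp' (res ++ [(j, i)])
    else pvScanA ob cb rest tmp res

-- mat[i][j] = [1]; i, j are enumerate positions (0 ≤ i, j < len), where .toNat is exact
def pvSet (m : List (List (List Int))) (i j : Int) : List (List (List Int)) :=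
  m.modify i.toNat (fun row => row.set j.toNat [1])

def db2cmap (ss_string : String) : List (List (List Int)) :=
  let cs := ss_string.toList
  let e := PySem.List.enumerate cs
  -- 'for ob, cb in brackets' with brackets = [("(",")"),("[","]"),("{","}")], res threaded through
  match pvScanA '(' ')' e [] [] with
  | none => []                                -- IndexError
  | some (_, res1) =>
    match pvScanA '[' ']' e [] res1 with
    | none => []
    | some (_, res2) =>
      match pvScanA '{' '}' e [] res2 with
      | none => []
      | some (_, res) =>
        let n := cs.length
        let mat := (List.range n).map (fun _ => (List.range n).map (fun _ => [(0 : Int)]))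
        res.foldl (fun m p => pvSet (pvSet m p.1 p.2) p.2 p.1) mat

-- ===== PORT B =====
-- single fused pass: three stacks and the symmetric partner dict
def pvStepB (st : Option (List Int × List Int × List Int × PySem.Dict Int Int)) (p : Int × Char) :
    Option (List Int × List Int × List Int × PySem.Dict Int Int) :=
  match st with
  | none => none
  | some (sp, sq, sc, pt) =>
    if p.2 = '(' then some (sp ++ [p.1], sq, sc, pt)
    else if p.2 = '[' then some (sp, sq ++ [p.1], sc, pt)
    else if p.2 = '{' then some (sp, sq, sc ++ [p.1], pt)
    else if p.2 = ')' then
      match PySem.List.pop? sp with           -- stk_paren.pop(): none = IndexError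
      | none => none
      | some (j, sp') => some (sp', sq, sc, (pt.insert p.1 j).insert j p.1)
    else if p.2 = ']' then
      match PySem.List.pop? sq with
      | none => none
      | some (j, sq') => some (sp, sq', sc, (pt.insert p.1 j).insert j p.1)
    else if p.2 = '}' then
      match PySem.List.pop? sc with
      | none => none
      | some (j, sc') => some (sp, sq, sc', (pt.insert p.1 j).insert j p.1)
    else st

def db2cmap_alt (ss_string : String) : List (List (List Int)) :=
  let cs := ss_string.toList
  match (PySem.List.enumerate cs).foldl pvStepB (some ([], [], [], PySem.Dict.empty)) with
  | none => []                                -- IndexError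
  | some (_, _, _, pt) =>
    let n : Int := PySem.Str.len ss_string
    (PySem.List.pyRange 0 n 1).map (fun i =>
      (PySem.List.pyRange 0 n 1).map (fun j =>
        if pt.get? i = some j then [(1 : Int)] else [(0 : Int)]))

-- ===== PRECONDITION & SPEC =====
-- Pre_ excludes exactly the unbalanced strings on which some closing bracket has no
-- matching opener of its own type, where A (and B) raise IndexError from list.pop().
def Pre_db2cmap (ss_string : String) : Prop :=
  ∀ k < ss_string.toList.length,
    ((ss_string.toList.take (k+1)).count ')' ≤ (ss_string.toList.take (k+1)).count '(') ∧
    ((ss_string.toList.take (k+1)).count ']' ≤ (ss_string.toList.take (k+1)).count '[') ∧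
    ((ss_string.toList.take (k+1)).count '}' ≤ (ss_string.toList.take (k+1)).count '{')
instance (ss_string : String) : Decidable (Pre_db2cmap ss_string) := by
  unfold Pre_db2cmap; infer_instance

def pvWitness_db2cmap : String := "((.[{)]})x"

def Spec_db2cmap (ss_string : String) (out : List (List (List Int))) : Prop := out = db2cmap_alt ss_string
instance (ss_string : String) (out : List (List (List Int))) : Decidable (Spec_db2cmap ss_string out) := by unfold Spec_db2cmap; infer_instance

-- ===== CLAIM (what is proved, stated in full; the proofs are below) =====
def Claim_equal_db2cmap : Prop := ∀ (ss_string : String), Dom_db2cmap ss_string → Pre_db2cmap ss_string → Spec_db2cmap ss_string (db2cmap ss_string)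

-- ===== LEMMAS AND PROOFS =====

def pvPM (r : List (Int × Int)) (x y : Int) : Prop := (x, y) ∈ r ∨ (y, x) ∈ r
def pvOcc (r : List (Int × Int)) (x : Int) : Prop := ∃ y, pvPM r x y

lemma pvPM_append (r1 r2 : List (Int × Int)) (x y : Int) :
    pvPM (r1 ++ r2) x y ↔ pvPM r1 x y ∨ pvPM r2 x y := by
  simp [pvPM]; tauto

lemma pvPM_pair (a b x y : Int) :
    pvPM [(a, b)] x y ↔ (x = a ∧ y = b) ∨ (x = b ∧ y = a) := by
  simp [pvPM, Prod.ext_iff]; tauto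

lemma pvOcc_append (r1 r2 : List (Int × Int)) (x : Int) :
    pvOcc (r1 ++ r2) x ↔ pvOcc r1 x ∨ pvOcc r2 x := by
  simp [pvOcc, pvPM_append, exists_or]

lemma pvOcc_pair (a b x : Int) : pvOcc [(a, b)] x ↔ x = a ∨ x = b := by
  constructor
  · rintro ⟨y, h⟩; rw [pvPM_pair] at h; tauto
  · rintro (rfl | rfl)
    · exact ⟨b, by rw [pvPM_pair]; tauto⟩
    · exact ⟨a, by rw [pvPM_pair]; tauto⟩

lemma pvNodup_extract (u v : List Int) (a : Int) (h : (u ++ a :: v).Nodup) :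
    a ∉ u ++ v ∧ (u ++ v).Nodup := by
  have h' : (a :: (u ++ v)).Nodup := (List.Perm.nodup_iff List.perm_middle).mp h
  exact List.nodup_cons.mp h'

lemma pvNodup_insert (u v : List Int) (a : Int) (h : (u ++ v).Nodup) (ha : a ∉ u ++ v) :
    (u ++ a :: v).Nodup := by
  rw [List.Perm.nodup_iff List.perm_middle]
  exact List.nodup_cons.mpr ⟨ha, h⟩

def pvOk (ob cb : Char) : Nat → List Char → Prop
  | _, [] => True
  | h, c :: rest =>
    if c = ob then pvOk ob cb (h + 1) rest
    else if c = cb then 0 < h ∧ pvOk ob cb (h - 1) rest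
    else pvOk ob cb h rest

lemma pvScanA_res_append (ob cb : Char) :
    ∀ (l : List (Int × Char)) (tmp : List Int) (res : List (Int × Int)),
    pvScanA ob cb l tmp res =
      (pvScanA ob cb l tmp []).map (fun q => (q.1, res ++ q.2)) := by
  intro l
  induction l with
  | nil => intro tmp res; simp [pvScanA]
  | cons p rest ih =>
    intro tmp res
    obtain ⟨i, s⟩ := p
    by_cases h1 : s = ob
    · simp only [pvScanA, if_pos h1]; exact ih _ _
    · by_cases h2 : s = cb
      · cases hp : PySem.List.pop? tmp with
        | none => simp [pvScanA, if_neg h1, if_pos h2, hp]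
        | some q =>
          obtain ⟨j, tmp'⟩ := q
          simp only [pvScanA, if_neg h1, if_pos h2, hp, List.nil_append]
          rw [ih _ (res ++ [(j, i)]), ih tmp' [(j, i)]]
          cases pvScanA ob cb rest tmp' [] <;> simp
      · simp only [pvScanA, if_neg h1, if_neg h2]; exact ih _ _

lemma pvPre_to_ok (ob cb : Char) (hne : ob ≠ cb) :
    ∀ (cs : List Char) (h : Nat),
    (∀ k < cs.length, (cs.take (k+1)).count cb ≤ h + (cs.take (k+1)).count ob) →
    pvOk ob cb h cs := by
  intro cs
  induction cs with
  | nil => intro h _; trivial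
  | cons c rest ih =>
    intro h H
    by_cases h1 : c = ob
    · simp only [pvOk, if_pos h1]
      apply ih
      intro k hk
      have := H (k+1) (by simpa using hk)
      simp [h1, List.count_cons, hne, Ne.symm hne] at this
      omega
    · by_cases h2 : c = cb
      · have h0 : 0 < h := by
          have := H 0 (by simp)
          simp [h2, List.count_cons, hne, Ne.symm hne] at this
          omega
        simp only [pvOk, if_neg h1, if_pos h2]
        refine ⟨h0, ih (h - 1) ?_⟩
        intro k hk
        have := H (k+1) (by simpa using hk)
        simp [h2, List.count_cons, hne, Ne.symm hne] at this
        omega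
      · simp only [pvOk, if_neg h1, if_neg h2]
        apply ih
        intro k hk
        have := H (k+1) (by simpa using hk)
        simpa [List.count_cons, h1, h2] using this

lemma pvScanA_ok (ob cb : Char) :
    ∀ (cs : List Char) (s : Int) (tmp : List Int) (res : List (Int × Int)),
    pvOk ob cb tmp.length cs →
    ∃ out, pvScanA ob cb (PySem.List.enumerate cs s) tmp res = some out := by
  intro cs
  induction cs with
  | nil => intro s tmp res _; exact ⟨(tmp, res), by simp [PySem.List.enumerate, pvScanA]⟩
  | cons c rest ih =>
    intro s tmp res hok
    rw [PySem.List.enumerate_cons]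
    by_cases h1 : c = ob
    · simp only [pvOk, if_pos h1] at hok
      simpa [pvScanA, h1] using ih (s+1) (tmp ++ [s]) res (by simpa using hok)
    · by_cases h2 : c = cb
      · simp only [pvOk, if_neg h1, if_pos h2] at hok
        obtain ⟨h0, hok⟩ := hok
        rcases List.eq_nil_or_concat tmp with rfl | ⟨tmp0, x, rfl⟩
        · simp at h0
        simp only [pvScanA, if_neg h1, if_pos h2, List.concat_eq_append, PySem.List.pop?_last]
        apply ih
        simpa using hok
      · simp only [pvOk, if_neg h1, if_neg h2] at hok
        simpa [pvScanA, h1, h2] using ih (s+1) tmp res hok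

set_option maxHeartbeats 1000000 in
lemma pvMain :
    ∀ (cs : List Char) (s : Int), 0 ≤ s →
    ∀ (sp sq sc : List Int) (pt : PySem.Dict Int Int)
      (rp rq rc : List (Int × Int)) (o1 o2 o3 : List Int × List (Int × Int)),
    pvScanA '(' ')' (PySem.List.enumerate cs s) sp rp = some o1 →
    pvScanA '[' ']' (PySem.List.enumerate cs s) sq rq = some o2 →
    pvScanA '{' '}' (PySem.List.enumerate cs s) sc rc = some o3 →
    (∀ x y, pt.get? x = some y ↔ pvPM (rp ++ rq ++ rc) x y) →
    (∀ x, (x ∈ sp ++ sq ++ sc ∨ pvOcc (rp ++ rq ++ rc) x) → 0 ≤ x ∧ x < s) →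
    ((sp ++ sq ++ sc).Nodup) →
    (∀ x ∈ sp ++ sq ++ sc, ¬ pvOcc (rp ++ rq ++ rc) x) →
    ∃ pt', (PySem.List.enumerate cs s).foldl pvStepB (some (sp, sq, sc, pt)) =
              some (o1.1, o2.1, o3.1, pt')
      ∧ (∀ x y, pt'.get? x = some y ↔ pvPM (o1.2 ++ o2.2 ++ o3.2) x y)
      ∧ (∀ x, (x ∈ o1.1 ++ o2.1 ++ o3.1 ∨ pvOcc (o1.2 ++ o2.2 ++ o3.2) x) →
              0 ≤ x ∧ x < s + cs.length) := by
  intro cs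
  induction cs with
  | nil =>
    intro s hs sp sq sc pt rp rq rc o1 o2 o3 h1 h2 h3 hpt hlt hnd hdisj
    simp only [PySem.List.enumerate, pvScanA, Option.some.injEq] at h1 h2 h3
    refine ⟨pt, ?_, ?_, ?_⟩
    · simp [PySem.List.enumerate, ← h1, ← h2, ← h3]
    · intro x y; rw [hpt, ← h1, ← h2, ← h3]
    · intro x hx; rw [← h1, ← h2, ← h3] at hx
      have := hlt x hx; simpa using this
  | cons c rest ih =>
    intro s hs sp sq sc pt rp rq rc o1 o2 o3 h1 h2 h3 hpt hlt hnd hdisj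
    rw [PySem.List.enumerate_cons] at h1 h2 h3 ⊢
    rw [List.foldl_cons]
    have hlen : ((c :: rest).length : Int) = rest.length + 1 := by simp
    by_cases e1 : c = '('
    · subst e1
      simp only [pvScanA, Char.reduceEq, reduceIte] at h1 h2 h3
      simp only [pvStepB, Char.reduceEq, reduceIte]
      obtain ⟨pt', hf, hp, hb⟩ := ih (s + 1) (by omega) (sp ++ [s]) sq sc pt rp rq rc o1 o2 o3
        h1 h2 h3 hpt
        (by intro x hx
            have hx' : (x ∈ sp ++ sq ++ sc ∨ pvOcc (rp ++ rq ++ rc) x) ∨ x = s := by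
              rcases hx with hx | hx
              · simp only [List.mem_append, List.mem_singleton] at hx ⊢; tauto
              · tauto
            rcases hx' with hx' | rfl
            · have := hlt x hx'; omega
            · omega)
        (by have hfresh : s ∉ sp ++ sq ++ sc := fun hm => absurd (hlt s (Or.inl hm)).2 (lt_irrefl s)
            have := pvNodup_insert sp (sq ++ sc) s (by simpa using hnd) (by simpa using hfresh)
            simpa using this)
        (by intro x hx
            have hx' : x ∈ sp ++ sq ++ sc ∨ x = s := by
              simp only [List.mem_append, List.mem_singleton] at hx ⊢; tauto
            rcases hx' with hx' | rfl
            · exact hdisj x hx'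
            · intro ho; exact absurd (hlt x (Or.inr ho)).2 (lt_irrefl x))
      exact ⟨pt', hf, hp, by intro x hx; have := hb x hx; rw [hlen]; omega⟩
    · by_cases e2 : c = '['
      · subst e2
        simp only [pvScanA, Char.reduceEq, reduceIte] at h1 h2 h3
        simp only [pvStepB, Char.reduceEq, reduceIte]
        obtain ⟨pt', hf, hp, hb⟩ := ih (s + 1) (by omega) (sp) (sq ++ [s]) sc pt rp rq rc o1 o2 o3
          h1 h2 h3 hpt
          (by intro x hx
              have hx' : (x ∈ sp ++ sq ++ sc ∨ pvOcc (rp ++ rq ++ rc) x) ∨ x = s := by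
                rcases hx with hx | hx
                · simp only [List.mem_append, List.mem_singleton] at hx ⊢; tauto
                · tauto
              rcases hx' with hx' | rfl
              · have := hlt x hx'; omega
              · omega)
          (by have hfresh : s ∉ sp ++ sq ++ sc := fun hm => absurd (hlt s (Or.inl hm)).2 (lt_irrefl s)
              have := pvNodup_insert (sp ++ sq) sc s (by simpa using hnd) (by simpa using hfresh)
              simpa using this)
          (by intro x hx
              have hx' : x ∈ sp ++ sq ++ sc ∨ x = s := by
                simp only [List.mem_append, List.mem_singleton] at hx ⊢; tauto
              rcases hx' with hx' | rfl
              · exact hdisj x hx'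
              · intro ho; exact absurd (hlt x (Or.inr ho)).2 (lt_irrefl x))
        exact ⟨pt', hf, hp, by intro x hx; have := hb x hx; rw [hlen]; omega⟩
      · by_cases e3 : c = '{'
        · subst e3
          simp only [pvScanA, Char.reduceEq, reduceIte] at h1 h2 h3
          simp only [pvStepB, Char.reduceEq, reduceIte]
          obtain ⟨pt', hf, hp, hb⟩ := ih (s + 1) (by omega) (sp) sq (sc ++ [s]) pt rp rq rc o1 o2 o3
            h1 h2 h3 hpt
            (by intro x hx
                have hx' : (x ∈ sp ++ sq ++ sc ∨ pvOcc (rp ++ rq ++ rc) x) ∨ x = s := by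
                  rcases hx with hx | hx
                  · simp only [List.mem_append, List.mem_singleton] at hx ⊢; tauto
                  · tauto
                rcases hx' with hx' | rfl
                · have := hlt x hx'; omega
                · omega)
            (by have hfresh : s ∉ sp ++ sq ++ sc := fun hm => absurd (hlt s (Or.inl hm)).2 (lt_irrefl s)
                have := pvNodup_insert (sp ++ sq ++ sc) ([] : List Int) s (by simpa using hnd) (by simpa using hfresh)
                simpa using this)
            (by intro x hx
                have hx' : x ∈ sp ++ sq ++ sc ∨ x = s := by
                  simp only [List.mem_append, List.mem_singleton] at hx ⊢; tauto
                rcases hx' with hx' | rfl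
                · exact hdisj x hx'
                · intro ho; exact absurd (hlt x (Or.inr ho)).2 (lt_irrefl x))
          exact ⟨pt', hf, hp, by intro x hx; have := hb x hx; rw [hlen]; omega⟩
        · by_cases e4 : c = ')'
          · subst e4
            simp only [pvScanA, Char.reduceEq, reduceIte] at h1 h2 h3
            simp only [pvStepB, Char.reduceEq, reduceIte]
            rcases List.eq_nil_or_concat sp with rfl | ⟨sp0, j, rfl⟩
            · rw [show PySem.List.pop? ([] : List Int) = none from rfl] at h1
              simp at h1
            · simp only [List.concat_eq_append] at h1 hlt hnd hdisj ⊢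
              rw [PySem.List.pop?_last] at h1 ⊢
              have hjR : ¬ pvOcc (rp ++ rq ++ rc) j := hdisj j (by simp)
              have hjlt : 0 ≤ j ∧ j < s := hlt j (Or.inl (by simp))
              have hsocc : ¬ pvOcc (rp ++ rq ++ rc) s :=
                fun ho => absurd (hlt s (Or.inr ho)).2 (lt_irrefl s)
              obtain ⟨hjnotin, hndnew⟩ := pvNodup_extract sp0 (sq ++ sc) j (by simpa using hnd)
              have hptNew : ∀ x y, ((pt.insert s j).insert j s).get? x = some y ↔
                  pvPM ((rp ++ [(j, s)]) ++ rq ++ rc) x y := by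
                intro x y
                rw [PySem.Dict.get?_insert, PySem.Dict.get?_insert]
                have hpm : pvPM ((rp ++ [(j, s)]) ++ rq ++ rc) x y ↔
                    pvPM (rp ++ rq ++ rc) x y ∨ ((x = j ∧ y = s) ∨ (x = s ∧ y = j)) := by
                  simp only [pvPM_append, pvPM_pair]; tauto
                rw [hpm]
                by_cases hx1 : x = j
                · subst hx1; rw [if_pos rfl]
                  constructor
                  · rintro h; injection h with h; subst h; tauto
                  · rintro (h | h)
                    · exact absurd ⟨y, h⟩ hjR
                    · rcases h with ⟨_, rfl⟩ | ⟨h1, h2⟩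
                      · rfl
                      · exfalso; omega
                · rw [if_neg hx1]
                  by_cases hx2 : x = s
                  · subst hx2; rw [if_pos rfl]
                    constructor
                    · rintro h; injection h with h; subst h; tauto
                    · rintro (h | h)
                      · exact absurd ⟨y, h⟩ hsocc
                      · rcases h with ⟨h1, _⟩ | ⟨_, rfl⟩
                        · exact absurd h1 hx1
                        · rfl
                  · rw [if_neg hx2, hpt]
                    constructor
                    · tauto
                    · rintro (h | h)
                      · exact h
                      · rcases h with ⟨h1, _⟩ | ⟨h1, _⟩
                        · exact absurd h1 hx1
                        · exact absurd h1 hx2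
              obtain ⟨pt', hf, hp, hb⟩ := ih (s + 1) (by omega) (sp0) sq sc
                  ((pt.insert s j).insert j s) (rp ++ [(j, s)]) rq rc o1 o2 o3
                h1 h2 h3 hptNew
                (by intro x hx
                    rcases hx with hx | hx
                    · have hxold : x ∈ (sp0 ++ [j]) ++ sq ++ sc := by
                        simp only [List.mem_append, List.mem_singleton] at hx ⊢; tauto
                      have := hlt x (Or.inl hxold); omega
                    · simp only [pvOcc_append, pvOcc_pair] at hx
                      have hcases : pvOcc (rp ++ rq ++ rc) x ∨ x = j ∨ x = s := by
                        simp only [pvOcc_append]; tauto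
                      rcases hcases with hc | rfl | rfl
                      · have := hlt x (Or.inr hc); omega
                      · omega
                      · omega)
                (by simpa using hndnew)
                (by intro x hx
                    have hxold : x ∈ (sp0 ++ [j]) ++ sq ++ sc := by
                      simp only [List.mem_append, List.mem_singleton] at hx ⊢; tauto
                    have hxj : x ≠ j := by
                      intro h; subst h
                      exact hjnotin (by simp only [List.mem_append] at hx ⊢; tauto)
                    have hxs : x ≠ s := fun h =>
                      absurd (hlt x (Or.inl hxold)).2 (by rw [h]; exact lt_irrefl s)
                    intro ho
                    simp only [pvOcc_append, pvOcc_pair] at ho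
                    have hcc : pvOcc (rp ++ rq ++ rc) x ∨ x = j ∨ x = s := by
                      simp only [pvOcc_append]; tauto
                    rcases hcc with hc | rfl | rfl
                    · exact hdisj x hxold hc
                    · exact hxj rfl
                    · exact hxs rfl)
              exact ⟨pt', hf, hp, by intro x hx; have := hb x hx; rw [hlen]; omega⟩
          · by_cases e5 : c = ']'
            · subst e5
              simp only [pvScanA, Char.reduceEq, reduceIte] at h1 h2 h3
              simp only [pvStepB, Char.reduceEq, reduceIte]
              rcases List.eq_nil_or_concat sq with rfl | ⟨sq0, j, rfl⟩
              · rw [show PySem.List.pop? ([] : List Int) = none from rfl] at h2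
                simp at h2
              · simp only [List.concat_eq_append] at h2 hlt hnd hdisj ⊢
                rw [PySem.List.pop?_last] at h2 ⊢
                have hjR : ¬ pvOcc (rp ++ rq ++ rc) j := hdisj j (by simp)
                have hjlt : 0 ≤ j ∧ j < s := hlt j (Or.inl (by simp))
                have hsocc : ¬ pvOcc (rp ++ rq ++ rc) s :=
                  fun ho => absurd (hlt s (Or.inr ho)).2 (lt_irrefl s)
                obtain ⟨hjnotin, hndnew⟩ := pvNodup_extract (sp ++ sq0) sc j (by simpa using hnd)
                have hptNew : ∀ x y, ((pt.insert s j).insert j s).get? x = some y ↔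
                    pvPM (rp ++ (rq ++ [(j, s)]) ++ rc) x y := by
                  intro x y
                  rw [PySem.Dict.get?_insert, PySem.Dict.get?_insert]
                  have hpm : pvPM (rp ++ (rq ++ [(j, s)]) ++ rc) x y ↔
                      pvPM (rp ++ rq ++ rc) x y ∨ ((x = j ∧ y = s) ∨ (x = s ∧ y = j)) := by
                    simp only [pvPM_append, pvPM_pair]; tauto
                  rw [hpm]
                  by_cases hx1 : x = j
                  · subst hx1; rw [if_pos rfl]
                    constructor
                    · rintro h; injection h with h; subst h; tauto
                    · rintro (h | h)
                      · exact absurd ⟨y, h⟩ hjR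
                      · rcases h with ⟨_, rfl⟩ | ⟨h1, h2⟩
                        · rfl
                        · exfalso; omega
                  · rw [if_neg hx1]
                    by_cases hx2 : x = s
                    · subst hx2; rw [if_pos rfl]
                      constructor
                      · rintro h; injection h with h; subst h; tauto
                      · rintro (h | h)
                        · exact absurd ⟨y, h⟩ hsocc
                        · rcases h with ⟨h1, _⟩ | ⟨_, rfl⟩
                          · exact absurd h1 hx1
                          · rfl
                    · rw [if_neg hx2, hpt]
                      constructor
                      · tauto
                      · rintro (h | h)
                        · exact h
                        · rcases h with ⟨h1, _⟩ | ⟨h1, _⟩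
                          · exact absurd h1 hx1
                          · exact absurd h1 hx2
                obtain ⟨pt', hf, hp, hb⟩ := ih (s + 1) (by omega) (sp) sq0 sc
                    ((pt.insert s j).insert j s) rp (rq ++ [(j, s)]) rc o1 o2 o3
                  h1 h2 h3 hptNew
                  (by intro x hx
                      rcases hx with hx | hx
                      · have hxold : x ∈ sp ++ (sq0 ++ [j]) ++ sc := by
                          simp only [List.mem_append, List.mem_singleton] at hx ⊢; tauto
                        have := hlt x (Or.inl hxold); omega
                      · simp only [pvOcc_append, pvOcc_pair] at hx
                        have hcases : pvOcc (rp ++ rq ++ rc) x ∨ x = j ∨ x = s := by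
                          simp only [pvOcc_append]; tauto
                        rcases hcases with hc | rfl | rfl
                        · have := hlt x (Or.inr hc); omega
                        · omega
                        · omega)
                  (by simpa using hndnew)
                  (by intro x hx
                      have hxold : x ∈ sp ++ (sq0 ++ [j]) ++ sc := by
                        simp only [List.mem_append, List.mem_singleton] at hx ⊢; tauto
                      have hxj : x ≠ j := by
                        intro h; subst h
                        exact hjnotin (by simp only [List.mem_append] at hx ⊢; tauto)
                      have hxs : x ≠ s := fun h =>
                        absurd (hlt x (Or.inl hxold)).2 (by rw [h]; exact lt_irrefl s)
                      intro ho
                      simp only [pvOcc_append, pvOcc_pair] at ho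
                      have hcc : pvOcc (rp ++ rq ++ rc) x ∨ x = j ∨ x = s := by
                        simp only [pvOcc_append]; tauto
                      rcases hcc with hc | rfl | rfl
                      · exact hdisj x hxold hc
                      · exact hxj rfl
                      · exact hxs rfl)
                exact ⟨pt', hf, hp, by intro x hx; have := hb x hx; rw [hlen]; omega⟩
            · by_cases e6 : c = '}'
              · subst e6
                simp only [pvScanA, Char.reduceEq, reduceIte] at h1 h2 h3
                simp only [pvStepB, Char.reduceEq, reduceIte]
                rcases List.eq_nil_or_concat sc with rfl | ⟨sc0, j, rfl⟩
                · rw [show PySem.List.pop? ([] : List Int) = none from rfl] at h3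
                  simp at h3
                · simp only [List.concat_eq_append] at h3 hlt hnd hdisj ⊢
                  rw [PySem.List.pop?_last] at h3 ⊢
                  have hjR : ¬ pvOcc (rp ++ rq ++ rc) j := hdisj j (by simp)
                  have hjlt : 0 ≤ j ∧ j < s := hlt j (Or.inl (by simp))
                  have hsocc : ¬ pvOcc (rp ++ rq ++ rc) s :=
                    fun ho => absurd (hlt s (Or.inr ho)).2 (lt_irrefl s)
                  obtain ⟨hjnotin, hndnew⟩ := pvNodup_extract (sp ++ sq ++ sc0) ([] : List Int) j (by simpa using hnd)
                  have hptNew : ∀ x y, ((pt.insert s j).insert j s).get? x = some y ↔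
                      pvPM (rp ++ rq ++ (rc ++ [(j, s)])) x y := by
                    intro x y
                    rw [PySem.Dict.get?_insert, PySem.Dict.get?_insert]
                    have hpm : pvPM (rp ++ rq ++ (rc ++ [(j, s)])) x y ↔
                        pvPM (rp ++ rq ++ rc) x y ∨ ((x = j ∧ y = s) ∨ (x = s ∧ y = j)) := by
                      simp only [pvPM_append, pvPM_pair]; tauto
                    rw [hpm]
                    by_cases hx1 : x = j
                    · subst hx1; rw [if_pos rfl]
                      constructor
                      · rintro h; injection h with h; subst h; tauto
                      · rintro (h | h)
                        · exact absurd ⟨y, h⟩ hjR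
                        · rcases h with ⟨_, rfl⟩ | ⟨h1, h2⟩
                          · rfl
                          · exfalso; omega
                    · rw [if_neg hx1]
                      by_cases hx2 : x = s
                      · subst hx2; rw [if_pos rfl]
                        constructor
                        · rintro h; injection h with h; subst h; tauto
                        · rintro (h | h)
                          · exact absurd ⟨y, h⟩ hsocc
                          · rcases h with ⟨h1, _⟩ | ⟨_, rfl⟩
                            · exact absurd h1 hx1
                            · rfl
                      · rw [if_neg hx2, hpt]
                        constructor
                        · tauto
                        · rintro (h | h)
                          · exact h
                          · rcases h with ⟨h1, _⟩ | ⟨h1, _⟩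
                            · exact absurd h1 hx1
                            · exact absurd h1 hx2
                  obtain ⟨pt', hf, hp, hb⟩ := ih (s + 1) (by omega) (sp) sq sc0
                      ((pt.insert s j).insert j s) rp rq (rc ++ [(j, s)]) o1 o2 o3
                    h1 h2 h3 hptNew
                    (by intro x hx
                        rcases hx with hx | hx
                        · have hxold : x ∈ sp ++ sq ++ (sc0 ++ [j]) := by
                            simp only [List.mem_append, List.mem_singleton] at hx ⊢; tauto
                          have := hlt x (Or.inl hxold); omega
                        · simp only [pvOcc_append, pvOcc_pair] at hx
                          have hcases : pvOcc (rp ++ rq ++ rc) x ∨ x = j ∨ x = s := by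
                            simp only [pvOcc_append]; tauto
                          rcases hcases with hc | rfl | rfl
                          · have := hlt x (Or.inr hc); omega
                          · omega
                          · omega)
                    (by simpa using hndnew)
                    (by intro x hx
                        have hxold : x ∈ sp ++ sq ++ (sc0 ++ [j]) := by
                          simp only [List.mem_append, List.mem_singleton] at hx ⊢; tauto
                        have hxj : x ≠ j := by
                          intro h; subst h
                          exact hjnotin (by simp only [List.mem_append] at hx ⊢; tauto)
                        have hxs : x ≠ s := fun h =>
                          absurd (hlt x (Or.inl hxold)).2 (by rw [h]; exact lt_irrefl s)
                        intro ho
                        simp only [pvOcc_append, pvOcc_pair] at ho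
                        have hcc : pvOcc (rp ++ rq ++ rc) x ∨ x = j ∨ x = s := by
                          simp only [pvOcc_append]; tauto
                        rcases hcc with hc | rfl | rfl
                        · exact hdisj x hxold hc
                        · exact hxj rfl
                        · exact hxs rfl)
                  exact ⟨pt', hf, hp, by intro x hx; have := hb x hx; rw [hlen]; omega⟩
              · simp only [pvScanA, e1, e2, e3, e4, e5, e6, if_false] at h1 h2 h3
                simp only [pvStepB, e1, e2, e3, e4, e5, e6, if_false]
                obtain ⟨pt', hf, hp, hb⟩ := ih (s + 1) (by omega) sp sq sc pt rp rq rc o1 o2 o3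
                  h1 h2 h3 hpt
                  (by intro x hx; have := hlt x hx; omega)
                  hnd hdisj
                exact ⟨pt', hf, hp, by intro x hx; have := hb x hx; rw [hlen]; omega⟩

def pvCell (m : List (List (List Int))) (i j : Nat) : List Int := (m.getD i []).getD j []

lemma pvCell_pvSet (n : Nat) (m : List (List (List Int))) (hm : m.length = n)
    (hrow : ∀ i (hi : i < m.length), m[i].length = n)
    (a b : Int) (ha : 0 ≤ a) (han : a < (n : Int)) (hb : 0 ≤ b) (hbn : b < (n : Int))
    (i j : Nat) (hi : i < n) (hj : j < n) :
    pvCell (pvSet m a b) i j = if i = a.toNat ∧ j = b.toNat then [1] else pvCell m i j := by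
  have hi' : i < m.length := by omega
  have hilen : i < (pvSet m a b).length := by simp [pvSet, List.length_modify]; omega
  simp only [pvSet] at hilen
  unfold pvCell pvSet
  rw [List.getD_eq_getElem _ _ hilen, List.getD_eq_getElem _ _ hi']
  rw [List.getElem_modify]
  by_cases hia : a.toNat = i
  · rw [if_pos hia]
    have hjr : j < (m[i].set b.toNat [1]).length := by rw [List.length_set, hrow i hi']; omega
    rw [List.getD_eq_getElem _ _ hjr, List.getElem_set]
    by_cases hjb : b.toNat = j
    · rw [if_pos hjb, if_pos ⟨hia.symm, hjb.symm⟩]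
    · rw [if_neg hjb, if_neg (by tauto)]
      rw [List.getD_eq_getElem _ _ (by rw [hrow i hi']; omega)]
  · rw [if_neg hia, if_neg (by tauto)]

lemma pvSet_shape (n : Nat) (m : List (List (List Int))) (hm : m.length = n)
    (hrow : ∀ i (hi : i < m.length), m[i].length = n) (a b : Int) :
    (pvSet m a b).length = n ∧
      (∀ i (hi : i < (pvSet m a b).length), (pvSet m a b)[i].length = n) := by
  refine ⟨by simpa [pvSet, List.length_modify] using hm, ?_⟩
  intro i hi
  have hi' : i < m.length := by simpa [pvSet, List.length_modify] using hi
  unfold pvSet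
  rw [List.getElem_modify]
  split_ifs
  · rw [List.length_set]; exact hrow i hi'
  · exact hrow i hi'

set_option maxHeartbeats 1000000 in
lemma pvFoldSet (n : Nat) :
    ∀ (r : List (Int × Int)) (m : List (List (List Int))),
    m.length = n → (∀ i (hi : i < m.length), m[i].length = n) →
    (∀ p ∈ r, 0 ≤ p.1 ∧ p.1 < (n : Int) ∧ 0 ≤ p.2 ∧ p.2 < (n : Int)) →
    (r.foldl (fun m p => pvSet (pvSet m p.1 p.2) p.2 p.1) m).length = n ∧
    (∀ i (hi : i < (r.foldl (fun m p => pvSet (pvSet m p.1 p.2) p.2 p.1) m).length),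
      (r.foldl (fun m p => pvSet (pvSet m p.1 p.2) p.2 p.1) m)[i].length = n) ∧
    (∀ i j, i < n → j < n →
      pvCell (r.foldl (fun m p => pvSet (pvSet m p.1 p.2) p.2 p.1) m) i j =
        if ((i : Int), (j : Int)) ∈ r ∨ ((j : Int), (i : Int)) ∈ r then [1] else pvCell m i j) := by
  intro r
  induction r with
  | nil =>
    intro m hm hrow _
    refine ⟨hm, hrow, ?_⟩
    intro i j hi hj
    simp
  | cons p rest ih =>
    intro m hm hrow hbnd
    obtain ⟨hp1, hp1n, hp2, hp2n⟩ := hbnd p (by simp)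
    obtain ⟨hl1, hr1⟩ := pvSet_shape n m hm hrow p.1 p.2
    obtain ⟨hl2, hr2⟩ := pvSet_shape n _ hl1 hr1 p.2 p.1
    rw [List.foldl_cons]
    obtain ⟨hL, hR, hC⟩ := ih (pvSet (pvSet m p.1 p.2) p.2 p.1) hl2 hr2
      (fun q hq => hbnd q (by simp [hq]))
    refine ⟨hL, hR, ?_⟩
    intro i j hi hj
    rw [hC i j hi hj]
    rw [pvCell_pvSet n _ hl1 hr1 p.2 p.1 hp2 hp2n hp1 hp1n i j hi hj]
    rw [pvCell_pvSet n m hm hrow p.1 p.2 hp1 hp1n hp2 hp2n i j hi hj]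
    have hpm : (((i : Int), (j : Int)) ∈ p :: rest ∨ ((j : Int), (i : Int)) ∈ p :: rest) ↔
        ((i : Int) = p.1 ∧ (j : Int) = p.2) ∨ ((i : Int) = p.2 ∧ (j : Int) = p.1) ∨
          (((i : Int), (j : Int)) ∈ rest ∨ ((j : Int), (i : Int)) ∈ rest) := by
      simp [Prod.ext_iff]; tauto
    have ht1 : (i = p.1.toNat ∧ j = p.2.toNat) ↔ ((i : Int) = p.1 ∧ (j : Int) = p.2) := by
      omega
    have ht2 : (i = p.2.toNat ∧ j = p.1.toNat) ↔ ((i : Int) = p.2 ∧ (j : Int) = p.1) := by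
      omega
    by_cases cA : ((i : Int), (j : Int)) ∈ rest ∨ ((j : Int), (i : Int)) ∈ rest
    · rw [if_pos cA, if_pos (hpm.mpr (Or.inr (Or.inr cA)))]
    · rw [if_neg cA]
      by_cases cB : i = p.2.toNat ∧ j = p.1.toNat
      · rw [if_pos cB, if_pos (hpm.mpr (Or.inr (Or.inl (ht2.mp cB))))]
      · rw [if_neg cB]
        by_cases cC : i = p.1.toNat ∧ j = p.2.toNat
        · rw [if_pos cC, if_pos (hpm.mpr (Or.inl (ht1.mp cC)))]
        · rw [if_neg cC, if_neg (fun h => by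
            rcases hpm.mp h with h | h | h
            exacts [cC (ht1.mpr h), cB (ht2.mpr h), cA h])]


-- ===== VERDICT (by name: the statement is the Claim_ definition above) =====
theorem db2cmap_spec : Claim_equal_db2cmap := by
  intro ss _ hpre
  unfold Spec_db2cmap
  obtain ⟨o1, h1⟩ := pvScanA_ok '(' ')' ss.toList 0 [] []
    (pvPre_to_ok '(' ')' (by decide) ss.toList 0 (fun k hk => by simpa using (hpre k hk).1))
  obtain ⟨o2, h2⟩ := pvScanA_ok '[' ']' ss.toList 0 [] []
    (pvPre_to_ok '[' ']' (by decide) ss.toList 0 (fun k hk => by simpa using (hpre k hk).2.1))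
  obtain ⟨o3, h3⟩ := pvScanA_ok '{' '}' ss.toList 0 [] []
    (pvPre_to_ok '{' '}' (by decide) ss.toList 0 (fun k hk => by simpa using (hpre k hk).2.2))
  obtain ⟨t1, r1⟩ := o1
  obtain ⟨t2, r2⟩ := o2
  obtain ⟨t3, r3⟩ := o3
  have h2' : pvScanA '[' ']' (PySem.List.enumerate ss.toList 0) [] r1 = some (t2, r1 ++ r2) := by
    rw [pvScanA_res_append, h2]; rfl
  have h3' : pvScanA '{' '}' (PySem.List.enumerate ss.toList 0) [] (r1 ++ r2) =
      some (t3, (r1 ++ r2) ++ r3) := by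
    rw [pvScanA_res_append, h3]; rfl
  obtain ⟨pt', hf, hp, hb⟩ := pvMain ss.toList 0 le_rfl [] [] [] PySem.Dict.empty [] [] []
    (t1, r1) (t2, r2) (t3, r3) h1 h2 h3
    (by intro x y
        simp only [PySem.Dict.get?_empty]
        constructor
        · intro h; cases h
        · rintro (h | h) <;> simp at h)
    (by intro x hx; exfalso
        rcases hx with hx | ⟨y, hy⟩
        · simp at hx
        · rcases hy with hy | hy <;> simp at hy)
    (by simp)
    (by intro x hx; simp at hx)
  simp only at hp hb hf
  simp only [db2cmap, db2cmap_alt, h1, h2', h3', hf]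
  have hbound : ∀ p ∈ (r1 ++ r2) ++ r3,
      0 ≤ p.1 ∧ p.1 < (ss.toList.length : Int) ∧ 0 ≤ p.2 ∧ p.2 < (ss.toList.length : Int) := by
    intro p hpmem
    have h1b := hb p.1 (Or.inr ⟨p.2, Or.inl (by simpa using hpmem)⟩)
    have h2b := hb p.2 (Or.inr ⟨p.1, Or.inr (by simpa using hpmem)⟩)
    simp only [zero_add] at h1b h2b
    exact ⟨h1b.1, h1b.2, h2b.1, h2b.2⟩
  obtain ⟨hL, hR, hC⟩ := pvFoldSet ss.toList.length ((r1 ++ r2) ++ r3)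
    ((List.range ss.toList.length).map
      (fun _ => (List.range ss.toList.length).map (fun _ => [(0 : Int)])))
    (by simp) (by intro i hi; simp) hbound
  rw [PySem.Str.len_eq, PySem.List.pyRange_zero_natCast, List.map_map]
  apply List.ext_getElem
  · rw [hL]; simp
  intro i hi1 hi2
  apply List.ext_getElem
  · rw [hR i hi1]; simp
  intro j hj1 hj2
  have hi : i < ss.toList.length := by simpa using hi2
  have hj : j < ss.toList.length := by rw [hR i hi1] at hj1; exact hj1
  have hcell := hC i j hi hj
  have hLget : (((r1 ++ r2) ++ r3).foldl (fun m p => pvSet (pvSet m p.1 p.2) p.2 p.1)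
      ((List.range ss.toList.length).map
        (fun _ => (List.range ss.toList.length).map (fun _ => [(0 : Int)]))))[i][j] =
      pvCell (((r1 ++ r2) ++ r3).foldl (fun m p => pvSet (pvSet m p.1 p.2) p.2 p.1)
      ((List.range ss.toList.length).map
        (fun _ => (List.range ss.toList.length).map (fun _ => [(0 : Int)])))) i j := by
    unfold pvCell
    rw [List.getD_eq_getElem _ _ hi1, List.getD_eq_getElem _ _ hj1]
  have hi0 : i < ((List.range ss.toList.length).map
      (fun _ => (List.range ss.toList.length).map (fun _ => [(0 : Int)]))).length := by
    simpa using hi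
  have hzero : pvCell ((List.range ss.toList.length).map
      (fun _ => (List.range ss.toList.length).map (fun _ => [(0 : Int)]))) i j = [0] := by
    unfold pvCell
    rw [List.getD_eq_getElem _ _ hi0]
    simp only [List.getElem_map, List.getElem_range]
    have hj0 : j < ((List.range ss.toList.length).map (fun _ => [(0 : Int)])).length := by
      simpa using hj
    rw [List.getD_eq_getElem _ _ hj0]
    simp
  simp only [Function.comp, List.getElem_map, List.getElem_range]
  refine Eq.trans hLget ?_
  rw [hcell, hzero]
  have hcond := hp (i : Int) (j : Int)
  by_cases hc : ((i : Int), (j : Int)) ∈ (r1 ++ r2) ++ r3 ∨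
      ((j : Int), (i : Int)) ∈ (r1 ++ r2) ++ r3
  · rw [if_pos hc, if_pos (hcond.mpr hc)]
  · rw [if_neg hc, if_neg (fun h => hc (hcond.mp h))]
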